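-- pv_equiv track=rewrite | github.com/cburggie/CBD2 | linebreaks.py | windowsify_delimiters
-- ===== SOURCE A (Python) =====
-- def windowsify_delimiters(contents):
-- 	windows_delimiter = "\x0d\x0a"
-- 	normal_delimiter = "\x0a"
-- 	accumulator = []
-- 	chunks = contents.split(windows_delimiter)
-- 	for c in chunks:
-- 		rows = c.split(normal_delimiter)
-- 		for r in rows:
-- 			accumulator.append(r)
-- 	return windows_delimiter.join(accumulator)
-- ===== SOURCE B (Python) =====
-- def windowsify_delimiters(contents):
-- 	windows_delimiter = "\x0d\x0a"
-- 	normal_delimiter = "\x0a"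
-- 	return contents.replace(windows_delimiter, normal_delimiter).replace(normal_delimiter, windows_delimiter)
-- ===== Notes on version B (the rewrite author's own statement) =====
-- stated objective: simpler
-- what changed: Replaces the split-into-chunks / nested-loop / join pipeline with two order-sensitive str.replace passes (CRLF collapsed to LF, then every LF promoted to CRLF), building no intermediate list of lines.
import Mathlib
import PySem

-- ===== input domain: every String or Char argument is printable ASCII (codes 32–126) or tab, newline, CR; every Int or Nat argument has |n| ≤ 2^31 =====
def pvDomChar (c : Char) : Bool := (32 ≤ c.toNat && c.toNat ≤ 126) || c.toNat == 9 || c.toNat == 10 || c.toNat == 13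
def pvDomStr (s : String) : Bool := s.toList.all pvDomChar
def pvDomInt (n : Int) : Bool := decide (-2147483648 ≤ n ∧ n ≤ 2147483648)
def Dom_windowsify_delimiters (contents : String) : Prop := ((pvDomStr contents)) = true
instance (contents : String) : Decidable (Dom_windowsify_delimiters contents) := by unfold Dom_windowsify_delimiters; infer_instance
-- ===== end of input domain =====

-- B replaces A's split-into-chunks / nested-loop / join pipeline with two order-sensitive
-- str.replace passes (CRLF collapsed to LF, then every LF promoted to CRLF): simpler, no
-- intermediate list of lines.

-- ===== PORT A =====
-- split/join are ported on code points via PySem.Chars (exact; the separators are nonempty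
-- literals so Python's str.split never raises).
def windowsify_delimiters (contents : String) : String :=
  let windows_delimiter : List Char := ['\x0d', '\x0a']
  let normal_delimiter : List Char := ['\x0a']
  let chunks := PySem.Chars.splitOn contents.toList windows_delimiter
  let accumulator := chunks.foldl (fun acc c =>
      (PySem.Chars.splitOn c normal_delimiter).foldl (fun acc r => acc ++ [r]) acc)
    ([] : List (List Char))
  String.ofList (PySem.Chars.join windows_delimiter accumulator)

-- ===== PORT B =====
def windowsify_delimiters_alt (contents : String) : String :=
  PySem.Str.replace (PySem.Str.replace contents "\x0d\x0a" "\x0a") "\x0a" "\x0d\x0a"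

-- ===== PRECONDITION & SPEC =====
def Spec_windowsify_delimiters (contents : String) (out : String) : Prop := out = windowsify_delimiters_alt contents
instance (contents : String) (out : String) : Decidable (Spec_windowsify_delimiters contents out) := by unfold Spec_windowsify_delimiters; infer_instance

-- ===== CLAIM (what is proved, stated in full; the proofs are below) =====
def Claim_equal_windowsify_delimiters : Prop := ∀ (contents : String), Dom_windowsify_delimiters contents → Spec_windowsify_delimiters contents (windowsify_delimiters contents)

-- ===== LEMMAS AND PROOFS =====

-- 'one pass replacing every lone LF by CRLF' — the common spec both sides are reduced to
def wspec : List Char → List Char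
  | [] => []
  | c :: r =>
    if c = '\r' ∧ r.head? = some '\n' then '\r' :: '\n' :: wspec r.tail
    else if c = '\n' then '\r' :: '\n' :: wspec r
    else c :: wspec r
termination_by l => l.length
decreasing_by all_goals (simp [List.length_tail]; try omega)

-- recursive specs of the two replace passes of B
def replCRLF : List Char → List Char
  | [] => []
  | c :: r =>
    if c = '\r' ∧ r.head? = some '\n' then '\n' :: replCRLF r.tail
    else c :: replCRLF r
termination_by l => l.length
decreasing_by all_goals (simp [List.length_tail]; try omega)

def replLF : List Char → List Char
  | [] => []
  | c :: r => if c = '\n' then '\r' :: '\n' :: replLF r else c :: replLF r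

-- recursive specs of the two splits of A
def splitCRLF : List Char → List Char → List (List Char)
  | [], cur => [cur.reverse]
  | c :: r, cur =>
    if c = '\r' ∧ r.head? = some '\n' then cur.reverse :: splitCRLF r.tail []
    else splitCRLF r (c :: cur)
termination_by l _ => l.length
decreasing_by all_goals (simp [List.length_tail]; try omega)

def splitLF : List Char → List Char → List (List Char)
  | [], cur => [cur.reverse]
  | c :: r, cur =>
    if c = '\n' then cur.reverse :: splitLF r []
    else splitLF r (c :: cur)

lemma isPrefixOf_crlf (c : Char) (r : List Char) :
    List.isPrefixOf ['\r', '\n'] (c :: r) = decide (c = '\r' ∧ r.head? = some '\n') := by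
  cases r with
  | nil => simp [List.isPrefixOf]
  | cons d r' =>
    simp only [List.isPrefixOf, List.head?_cons, Option.some.injEq]
    by_cases h : c = '\x0d' <;> by_cases h2 : d = '\n' <;> simp [h, h2, Ne.symm]

lemma isPrefixOf_lf (c : Char) (r : List Char) :
    List.isPrefixOf ['\n'] (c :: r) = decide (c = '\n') := by
  simp only [List.isPrefixOf, Bool.and_true]
  by_cases h : c = '\n' <;> simp [h, Ne.symm]

lemma go_split_crlf (fuel : Nat) : ∀ (l cur : List Char) (acc : List (List Char)),
    l.length < fuel →
    PySem.Chars.splitOn.go ['\r', '\n'] fuel l cur acc = acc.reverse ++ splitCRLF l cur := by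
  induction fuel with
  | zero => intro l cur acc h; omega
  | succ n ih =>
    intro l cur acc h
    cases l with
    | nil => simp [PySem.Chars.splitOn.go, splitCRLF]
    | cons c r =>
      rw [PySem.Chars.splitOn.go, isPrefixOf_crlf]
      by_cases hc : c = '\r' ∧ r.head? = some '\n'
      · obtain ⟨hc1, hc2⟩ := hc
        cases r with
        | nil => simp at hc2
        | cons d r' =>
          simp only [List.head?_cons, Option.some.injEq] at hc2
          subst hc1; subst hc2
          simp only [decide_eq_true_eq]
          rw [ih _ _ _ (by simp at h ⊢; omega)]
          simp [splitCRLF]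
      · rw [if_neg (by simpa using hc)]
        rw [ih _ _ _ (by simp at h ⊢; omega)]
        rw [splitCRLF, if_neg hc]

lemma go_split_lf (fuel : Nat) : ∀ (l cur : List Char) (acc : List (List Char)),
    l.length < fuel →
    PySem.Chars.splitOn.go ['\n'] fuel l cur acc = acc.reverse ++ splitLF l cur := by
  induction fuel with
  | zero => intro l cur acc h; omega
  | succ n ih =>
    intro l cur acc h
    cases l with
    | nil => simp [PySem.Chars.splitOn.go, splitLF]
    | cons c r =>
      rw [PySem.Chars.splitOn.go, isPrefixOf_lf]
      by_cases hc : c = '\n'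
      · subst hc
        simp only [decide_true, if_true]
        rw [ih _ _ _ (by simp at h ⊢; omega)]
        simp [splitLF]
      · rw [if_neg (by simpa using hc)]
        rw [ih _ _ _ (by simp at h ⊢; omega)]
        rw [splitLF, if_neg hc]

lemma splitOn_crlf (l : List Char) :
    PySem.Chars.splitOn l ['\r', '\n'] = splitCRLF l [] := by
  rw [PySem.Chars.splitOn, go_split_crlf _ _ _ _ (by omega)]; rfl

lemma splitOn_lf (l : List Char) :
    PySem.Chars.splitOn l ['\n'] = splitLF l [] := by
  rw [PySem.Chars.splitOn, go_split_lf _ _ _ _ (by omega)]; rfl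

lemma go_repl_crlf (fuel : Nat) : ∀ (l acc : List Char),
    l.length ≤ fuel →
    PySem.Chars.replace.go ['\r', '\n'] ['\n'] fuel l acc = acc.reverse ++ replCRLF l := by
  induction fuel with
  | zero =>
    intro l acc h
    have : l = [] := by cases l <;> simp_all
    subst this; simp [PySem.Chars.replace.go, replCRLF]
  | succ n ih =>
    intro l acc h
    cases l with
    | nil => simp [PySem.Chars.replace.go, replCRLF]
    | cons c r =>
      rw [PySem.Chars.replace.go, isPrefixOf_crlf]
      by_cases hc : c = '\r' ∧ r.head? = some '\n'
      · obtain ⟨hc1, hc2⟩ := hc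
        cases r with
        | nil => simp at hc2
        | cons d r' =>
          simp only [List.head?_cons, Option.some.injEq] at hc2
          subst hc1; subst hc2
          simp only [decide_eq_true_eq]
          rw [ih _ _ (by simp at h ⊢; omega)]
          simp [replCRLF]
      · rw [if_neg (by simpa using hc)]
        rw [ih _ _ (by simp at h ⊢; omega)]
        rw [replCRLF, if_neg hc]; simp

lemma go_repl_lf (fuel : Nat) : ∀ (l acc : List Char),
    l.length ≤ fuel →
    PySem.Chars.replace.go ['\n'] ['\r', '\n'] fuel l acc = acc.reverse ++ replLF l := by
  induction fuel with
  | zero =>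
    intro l acc h
    have : l = [] := by cases l <;> simp_all
    subst this; simp [PySem.Chars.replace.go, replLF]
  | succ n ih =>
    intro l acc h
    cases l with
    | nil => simp [PySem.Chars.replace.go, replLF]
    | cons c r =>
      rw [PySem.Chars.replace.go, isPrefixOf_lf]
      by_cases hc : c = '\n'
      · subst hc
        simp only [decide_true, if_true]
        rw [ih _ _ (by simp at h ⊢; omega)]
        simp [replLF]
      · rw [if_neg (by simpa using hc)]
        rw [ih _ _ (by simp at h ⊢; omega)]
        rw [replLF, if_neg hc]; simp

lemma replace_crlf (l : List Char) :
    PySem.Chars.replace l ['\r', '\n'] ['\n'] = replCRLF l := by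
  rw [PySem.Chars.replace]
  simp only [List.isEmpty_cons, if_neg (by decide : ¬ (false = true))]
  exact go_repl_crlf _ _ _ (le_refl _)

lemma replace_lf (l : List Char) :
    PySem.Chars.replace l ['\n'] ['\r', '\n'] = replLF l := by
  rw [PySem.Chars.replace]
  simp only [List.isEmpty_cons, if_neg (by decide : ¬ (false = true))]
  exact go_repl_lf _ _ _ (le_refl _)

-- B's two passes compose to wspec
lemma replLF_replCRLF (n : Nat) : ∀ (l : List Char), l.length ≤ n →
    replLF (replCRLF l) = wspec l := by
  induction n with
  | zero =>
    intro l h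
    have : l = [] := by cases l <;> simp_all
    subst this; simp [replCRLF, replLF, wspec]
  | succ n ih =>
    intro l h
    cases l with
    | nil => simp [replCRLF, replLF, wspec]
    | cons c r =>
      by_cases hc : c = '\r' ∧ r.head? = some '\n'
      · rw [replCRLF, if_pos hc, wspec, if_pos hc, replLF, if_pos rfl]
        rw [ih _ (by simp at h ⊢; omega)]
      · rw [replCRLF, if_neg hc, wspec, if_neg hc, replLF]
        by_cases hn : c = '\n'
        · rw [if_pos hn, if_pos hn, ih _ (by simp at h ⊢; omega)]
        · rw [if_neg hn, if_neg hn, ih _ (by simp at h ⊢; omega)]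

lemma replLF_append (xs ys : List Char) :
    replLF (xs ++ ys) = replLF xs ++ replLF ys := by
  induction xs with
  | nil => simp [replLF]
  | cons c t ih =>
    by_cases hn : c = '\n'
    · simp [replLF, if_pos hn, ih]
    · simp [replLF, if_neg hn, ih]

lemma splitLF_shape (x : List Char) : ∀ cur, ∃ h t, splitLF x cur = h :: t := by
  induction x with
  | nil => intro cur; exact ⟨cur.reverse, [], rfl⟩
  | cons c r ih =>
    intro cur
    by_cases hn : c = '\n'
    · exact ⟨cur.reverse, splitLF r [], by rw [splitLF, if_pos hn]⟩
    · obtain ⟨h, t, he⟩ := ih (c :: cur)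
      exact ⟨h, t, by rw [splitLF, if_neg hn, he]⟩

lemma splitCRLF_shape_aux (n : Nat) : ∀ (l cur : List Char), l.length ≤ n →
    ∃ h t, splitCRLF l cur = h :: t := by
  induction n with
  | zero =>
    intro l cur h
    have : l = [] := by cases l <;> simp_all
    subst this; exact ⟨cur.reverse, [], by rw [splitCRLF]⟩
  | succ n ih =>
    intro l cur h
    cases l with
    | nil => exact ⟨cur.reverse, [], by rw [splitCRLF]⟩
    | cons c r =>
      by_cases hc : c = '\x0d' ∧ r.head? = some '\n'
      · exact ⟨cur.reverse, splitCRLF r.tail [], by rw [splitCRLF, if_pos hc]⟩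
      · obtain ⟨h', t', he⟩ := ih r (c :: cur) (by simp at h ⊢; omega)
        exact ⟨h', t', by rw [splitCRLF, if_neg hc, he]⟩

lemma splitCRLF_shape (l cur : List Char) : ∃ h t, splitCRLF l cur = h :: t :=
  splitCRLF_shape_aux l.length l cur (le_refl _)

lemma join_splitLF (x : List Char) : ∀ (cur : List Char), '\n' ∉ cur →
    PySem.Chars.join ['\r', '\n'] (splitLF x cur) = cur.reverse ++ replLF x := by
  induction x with
  | nil => intro cur _; simp [splitLF, replLF, PySem.Chars.join_singleton]
  | cons c r ih =>
    intro cur hcur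
    by_cases hn : c = '\n'
    · rw [splitLF, if_pos hn]
      obtain ⟨h, t, he⟩ := splitLF_shape r []
      rw [he, PySem.Chars.join_cons_cons, ← he, ih [] (by simp)]
      subst hn; simp [replLF]
    · rw [splitLF, if_neg hn, ih (c :: cur) (by simp [hcur]; exact fun h => hn h.symm)]
      rw [replLF, if_neg hn]; simp

lemma join_append (sep : List Char) (xs ys : List (List Char))
    (hx : xs ≠ []) (hy : ys ≠ []) :
    PySem.Chars.join sep (xs ++ ys) = PySem.Chars.join sep xs ++ sep ++ PySem.Chars.join sep ys := by
  induction xs with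
  | nil => exact absurd rfl hx
  | cons a xs' ih =>
    cases xs' with
    | nil =>
      cases ys with
      | nil => exact absurd rfl hy
      | cons b t => simp [PySem.Chars.join_cons_cons, PySem.Chars.join_singleton]
    | cons b t =>
      have := ih (by simp)
      simp only [List.cons_append] at this ⊢
      rw [PySem.Chars.join_cons_cons, PySem.Chars.join_cons_cons, this]
      simp

lemma flatMap_split_ne_nil (l cur : List Char) :
    (splitCRLF l cur).flatMap (fun c => splitLF c []) ≠ [] := by
  obtain ⟨h, t, he⟩ := splitCRLF_shape l cur
  obtain ⟨h', t', he'⟩ := splitLF_shape h []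
  simp [he, he']

lemma mainA (n : Nat) : ∀ (l cur : List Char), l.length ≤ n →
    PySem.Chars.join ['\r', '\n'] ((splitCRLF l cur).flatMap (fun c => splitLF c [])) =
      replLF cur.reverse ++ wspec l := by
  induction n with
  | zero =>
    intro l cur h
    have : l = [] := by cases l <;> simp_all
    subst this
    simp [splitCRLF, wspec, join_splitLF _ [] (by simp)]
  | succ n ih =>
    intro l cur h
    cases l with
    | nil => simp [splitCRLF, wspec, join_splitLF _ [] (by simp)]
    | cons c r =>
      by_cases hc : c = '\r' ∧ r.head? = some '\n'
      · rw [splitCRLF, if_pos hc, wspec, if_pos hc]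
        rw [List.flatMap_cons]
        rw [join_append _ _ _ (by obtain ⟨h', t', he'⟩ := splitLF_shape cur.reverse []; simp [he'])
              (flatMap_split_ne_nil _ _)]
        rw [join_splitLF _ [] (by simp), ih _ [] (by simp at h ⊢; omega)]
        simp [replLF]
      · rw [splitCRLF, if_neg hc, ih _ (c :: cur) (by simp at h ⊢; omega)]
        rw [wspec, if_neg hc]
        rw [List.reverse_cons, replLF_append]
        by_cases hn : c = '\n'
        · simp [replLF, hn]
        · simp [replLF, hn]

lemma portA_eq (s : String) :
    windowsify_delimiters s = String.ofList (wspec s.toList) := by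
  rw [windowsify_delimiters]
  simp only [PySem.List.foldl_append_singleton, PySem.List.foldl_append_eq_flatMap,
    List.nil_append, splitOn_crlf, splitOn_lf]
  rw [mainA s.toList.length _ _ (le_refl _)]
  simp [replLF]

lemma portB_eq (s : String) :
    windowsify_delimiters_alt s = String.ofList (wspec s.toList) := by
  have h : (windowsify_delimiters_alt s).toList = wspec s.toList := by
    rw [windowsify_delimiters_alt, PySem.Str.toList_replace, PySem.Str.toList_replace]
    have h1 : ("\x0d\x0a" : String).toList = ['\x0d', '\x0a'] := by decide
    have h2 : ("\x0a" : String).toList = ['\x0a'] := by decide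
    rw [h1, h2, replace_crlf, replace_lf]
    exact replLF_replCRLF _ _ (le_refl _)
  rw [← @String.ofList_toList (windowsify_delimiters_alt s), h]

-- ===== VERDICT (by name: the statement is the Claim_ definition above) =====
theorem windowsify_delimiters_spec : Claim_equal_windowsify_delimiters := by
  intro contents _
  unfold Spec_windowsify_delimiters
  rw [portA_eq, portB_eq]
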